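/- GENERATED by mk_final_copies.py from the proof of the farm's unit `add_entry` (farm:add_entry.1: Proof.lean) as the
   re-elaboration sweep compiled it — do not edit. -/
import Asan.CheckWalk
import Vorbis.Spec.Units.add_entry

open X86 X86.User Asan Vorbis Vorbis.Spec

set_option maxRecDepth 4000
set_option maxHeartbeats 4000000

namespace Vorbis.Spec.add_entry

/-! ### The field loads of `*c`, as the walker reads them (rewrite rules of every step) -/

/-- The walker's load `[rdi + 1BH]` is the field `c->sparse` (0x10434c, C line 1104). -/
theorem read_sparse (mem : Mem) (w : Word) :
    mem.readLE (w + 27) 1 = Codebook.sparse mem w.toNat := by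
  have h := readLE_field mem w 27 1
  simp only [vacc, voff]
  exact h

/-- The walker's load `[rdi + 28H]` is the field `c->codewords` (0x104362 / 0x104398, C lines 1105 / 1107). -/
theorem read_codewords (mem : Mem) (w : Word) :
    mem.readLE (w + 40) 8 = Codebook.codewords mem w.toNat := by
  have h := readLE_field mem w 40 8
  simp only [vacc, voff]
  exact h

/-- The walker's load `[rdi + 8]` is the field `c->codeword_lengths` (0x1043b0, C line 1108). -/
theorem read_lengths (mem : Mem) (w : Word) :
    mem.readLE (w + 8) 8 = Codebook.codeword_lengths mem w.toNat := by
  have h := readLE_field mem w 8 8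
  simp only [vacc, voff]
  exact h

/-! ### Reading back what was stored -/

/-- The word just stored at the number `a` (`mov [rbp], r13d`) reads back as the low half of the register stored. -/
theorem u32_stored (m : Mem) (w : Word) (a : Nat) (x : Word) (hw : w.toNat = a) :
    (m.writeLE w 4 (Word.part .w32 x).toNat).u32 a = argU32 x := by
  unfold Mem.u32
  rw [← eq_addr w a hw, Mem.readLE_writeLE_same _ _ _ _ (by decide), Asan.part32_toNat]
  show (x.toNat % 2 ^ 32) % 256 ^ 4 = x.toNat % 2 ^ 32
  omega

/-- The low byte of a value stored with more than one byte reads back as the value modulo 256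
(`mov [rsp+4], r8d` at 0x104339 … `movzx eax, byte [rsp+4]` at 0x1043bc). -/
theorem readLE1_writeLE (f : Mem) (a : Word) (n v : Nat) (hn : n < 2 ^ 64) :
    (f.writeLE a (n + 1) v).readLE a 1 = v % 256 := by
  rw [Mem.readLE_one]
  have hhead : ∀ i, i < n → a + 1 + UInt64.ofNat i ≠ a := by
    intro i hi
    rw [Mem.add_ofNat_succ]
    exact PhysMem.add_ofNat_ne_self a (i + 1) (by omega) (by omega)
  show (((f.write a (UInt8.ofNat (v % 256))).writeLE (a + 1) n (v / 256)).read a).toNat = v % 256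
  rw [Mem.read_writeLE_other _ _ _ _ _ hhead, Mem.read_write_same]
  show (UInt8.ofNat (v % 256)).toNat = v % 256
  rw [UInt8.toNat_ofNat']
  omega

/-- `readLE1_writeLE` for a 4-byte store (the form `rw` finds in the walker's memory term). -/
theorem readLE1_writeLE4 (f : Mem) (a : Word) (v : Nat) : (f.writeLE a 4 v).readLE a 1 = v % 256 :=
  readLE1_writeLE f a 3 v (by decide)

/-- The byte that `movzx eax, byte [m] ; mov [m'], al` stores, for a byte `x` loaded: the byte itself. -/
theorem byte_roundtrip (x : Nat) :
    (BitVec.setWidth 8 (BitVec.zeroExtend 32 (BitVec.ofNat 8 x))).toNat = x % 256 := by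
  simp only [BitVec.toNat_setWidth, BitVec.zeroExtend, BitVec.toNat_ofNat]
  omega

/-! ### The two arms -/

/-- **The dense arm** (`c->sparse = 0`, C line 1105: `c->codewords[symbol] = huff_code`): 0x104320 … 0x104350 not taken …
0x104380. Three check calls (`c->sparse`, `c->codewords`, `codewords[symbol]`), one 4-byte store. -/
theorem dense_arm {Lay : Layout} (hLay : Lay.hi = 0x1000000) {μ : Microarch} (hμ : UserX.MicroOK μ) {u₀ : State}
    (hcode : HasCodeNat Lay u₀ Vorbis.L.add_entry.entry Vorbis.Code.code_add_entry.nat Vorbis.L.add_entry.size)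
    (hload1 : Asan.SmallCheck Lay μ Vorbis.WayInv (Vorbis.CodeOK u₀) [.rax, .rdx] 1 Vorbis.L.__asan_load1_noabort.entry)
    (hload8 : Asan.SmallCheck Lay μ Vorbis.WayInv (Vorbis.CodeOK u₀) [.rax, .rcx, .rdx] 8 Vorbis.L.__asan_load8_noabort.entry)
    (hstore4 : Asan.SmallCheck Lay μ Vorbis.WayInv (Vorbis.CodeOK u₀) [.rax, .rcx, .rdx] 4 Vorbis.L.__asan_store4_noabort.entry)
    (others : List Obj) (frames : List (Nat × FrameLayout)) {u : State} {ret : Word}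
    (he : AtEntry (Vorbis.conv u₀) Vorbis.L.add_entry.entry (add_entry.spec others frames).frame ret u)
    (hpre : AddEntryPre others frames u)
    (hs : Codebook.sparse u.mem (u.reg .rdi).toNat = 0) :
    ReachVia Lay μ Vorbis.WayInv u (Returned (Vorbis.conv u₀) (add_entry.spec others frames) u ret) := by
  v_entry he
  obtain ⟨hsh, hbook, hdense, -⟩ := hpre
  have hsp := hsh.rsp
  -- where `*c` is: one arithmetic fact (above the text, inside the data space, off this function's stack)
  have eHi : L.textHi = 0x119d40 := rfl
  have hwb := site_where hsh.inv hsh.offText (by omega) hbook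
  simp only [Vorbis.Off.sizeof.Codebook, eHi] at hwb hbook
  -- the fields of `*c` the code loads
  have r27 := read_sparse u.mem (u.reg .rdi)
  have r40 := read_codewords u.mem (u.reg .rdi)
  -- the precondition of this arm: `0 ≤ symbol`, and the cell `codewords[symbol]` is a live site
  obtain ⟨hsym, hcell⟩ := hdense hs
  clear hdense
  have hwr := add_entry.spec_writes_dense others frames u hs
  simp only [add_entry.denseCell, argU32] at hsym hcell hwr
  have hwc := site_where hsh.inv hsh.offText (by omega) hcell
  rw [eHi] at hwc
  -- the address of the cell as the walker builds it (`movsxd ; shl 2 ; add [rbx+28H]`), as a number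
  have hadr := sext32_shl2_add (u.reg .rdx) (Codebook.codewords u.mem (u.reg .rdi).toNat) hsym (by omega)
  generalize hcw : Codebook.codewords u.mem (u.reg .rdi).toNat = cw at *
  generalize hspd : Codebook.sparse u.mem (u.reg .rdi).toNat = sp at *
  u_walk hcode [hμ.vendor] span [Vorbis.L.textLo, Vorbis.L.textHi] side (v_side)
  · -- 0x104347 (C 1104): the check of the load of `c->sparse`, inside `*c`
    have hun : ShadowUntouched u.mem s_104347.mem := by v_untouched
    refine check_site hsh.inv hun (hbook.sub (b := (u.reg .rdi).toNat + 27) (by omega) (by omega) (by decide)) ?_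
    u_omega
  · -- 0x104356 (C 1105): the check of the load of `c->codewords`, inside `*c`
    have hun : ShadowUntouched u.mem s_104356.mem := by v_untouched
    refine check_site hsh.inv hun (hbook.sub (b := (u.reg .rdi).toNat + 40) (by omega) (by omega) (by decide)) ?_
    u_omega
  · -- 0x104369 (C 1105): the check of the store to `codewords[symbol]`: the precondition's site
    have hun : ShadowUntouched u.mem s_104369.mem := by v_untouched
    exact check_site hsh.inv hun hcell hadr
  · -- 0x104380 (C 1111): the state after the `ret`
    refine ReachVia.done ?_
    v_returned
    · -- the post
      refine ⟨by v_untouched, ?_, ?_⟩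
      · -- `codewords[symbol] = huff_code`: the last store
        intro _
        simp only [add_entry.denseCell, hcw]
        rw [w_mem]
        exact u32_stored _ _ _ _ hadr
      · intro hne
        rw [hspd] at hne
        exact absurd hs hne
    · -- the footprint: the frame and the one cell
      simp only [X86.User.Spec.footprint, add_entry.spec_frame]
      rw [hwr]
      simp only [Block.span]
      u_same

/-- **The sparse arm** (`c->sparse ≠ 0`, C lines 1107–1109: `c->codewords[count] = huff_code ; c->codeword_lengths[count] = len ;
values[count] = symbol`): 0x104320 … 0x104350 taken, 0x104381 … 0x1043db, 0x104372 … 0x104380. Six check calls, three stores;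
`c->codeword_lengths` is re-read after the first store (the cell is apart from `*c`), `len` and `values` come back from the
stack slots `[rsp+4]`, `[rsp+8]` (the cells are off the stack). -/
theorem sparse_arm {Lay : Layout} (hLay : Lay.hi = 0x1000000) {μ : Microarch} (hμ : UserX.MicroOK μ) {u₀ : State}
    (hcode : HasCodeNat Lay u₀ Vorbis.L.add_entry.entry Vorbis.Code.code_add_entry.nat Vorbis.L.add_entry.size)
    (hload1 : Asan.SmallCheck Lay μ Vorbis.WayInv (Vorbis.CodeOK u₀) [.rax, .rdx] 1 Vorbis.L.__asan_load1_noabort.entry)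
    (hload8 : Asan.SmallCheck Lay μ Vorbis.WayInv (Vorbis.CodeOK u₀) [.rax, .rcx, .rdx] 8 Vorbis.L.__asan_load8_noabort.entry)
    (hstore4 : Asan.SmallCheck Lay μ Vorbis.WayInv (Vorbis.CodeOK u₀) [.rax, .rcx, .rdx] 4 Vorbis.L.__asan_store4_noabort.entry)
    (hstore1 : Asan.SmallCheck Lay μ Vorbis.WayInv (Vorbis.CodeOK u₀) [.rax, .rdx] 1 Vorbis.L.__asan_store1_noabort.entry)
    (others : List Obj) (frames : List (Nat × FrameLayout)) {u : State} {ret : Word}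
    (he : AtEntry (Vorbis.conv u₀) Vorbis.L.add_entry.entry (add_entry.spec others frames).frame ret u)
    (hpre : AddEntryPre others frames u)
    (hs : Codebook.sparse u.mem (u.reg .rdi).toNat ≠ 0) :
    ReachVia Lay μ Vorbis.WayInv u (Returned (Vorbis.conv u₀) (add_entry.spec others frames) u ret) := by
  v_entry he
  obtain ⟨hsh, hbook, -, hsparse⟩ := hpre
  have hsp := hsh.rsp
  -- where `*c` is: one arithmetic fact (above the text, inside the data space, off this function's stack)
  have eHi : L.textHi = 0x119d40 := rfl
  have hwb := site_where hsh.inv hsh.offText (by omega) hbook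
  simp only [Vorbis.Off.sizeof.Codebook, eHi] at hwb hbook
  -- the fields of `*c` the code loads
  have r27 := read_sparse u.mem (u.reg .rdi)
  have r40 := read_codewords u.mem (u.reg .rdi)
  have r8 := read_lengths u.mem (u.reg .rdi)
  -- the precondition of this arm: `0 ≤ count`, the three cells are live sites, apart from `*c` and from each other
  obtain ⟨hcnt, hcwc, hlenc, hvalc, hap⟩ := hsparse hs
  clear hsparse
  have hwr := add_entry.spec_writes_sparse others frames u hs
  have hsp8 : Codebook.sparse u.mem (u.reg .rdi).toNat < 256 := by
    rw [← r27]
    exact Mem.readLE_lt' _ _ 1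
  simp only [add_entry.cwCell, add_entry.lenCell, add_entry.valCell, argU32, Codebook.block,
    Vorbis.Off.sizeof.Codebook] at hcnt hcwc hlenc hvalc hwr hap
  simp only [Apart, List.pairwise_cons, List.mem_cons, List.not_mem_nil, or_false, forall_eq_or_imp, forall_eq,
    false_imp_iff, implies_true, List.Pairwise.nil, and_true, Block.disjoint] at hap
  obtain ⟨⟨hap_b1, hap_b2, hap_b3⟩, ⟨hap_12, hap_13⟩, hap_23⟩ := hap
  -- where the three cells are
  have hw1 := site_where hsh.inv hsh.offText (by omega) hcwc
  have hw2 := site_where hsh.inv hsh.offText (by omega) hlenc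
  have hw3 := site_where hsh.inv hsh.offText (by omega) hvalc
  rw [eHi] at hw1 hw2 hw3
  generalize hcw : Codebook.codewords u.mem (u.reg .rdi).toNat = cw at *
  generalize hcl : Codebook.codeword_lengths u.mem (u.reg .rdi).toNat = cl at *
  generalize hspd : Codebook.sparse u.mem (u.reg .rdi).toNat = sp at *
  generalize hcn : (u.reg .rcx).toNat % 2 ^ 32 = cnt at *
  -- `movsxd r12, r12d` of the non-negative `count` is `count`
  have hsx : (Word.ofBV (BitVec.signExtend 64 (Word.part .w32 (u.reg .rcx)))).toNat = cnt := by
    rw [toNat_sext32 _ (by rw [Asan.part32_toNat, hcn]; exact hcnt), Asan.part32_toNat, hcn]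
  -- the branch at 0x104350 compares the byte: the dense arm is pruned
  have hs' : sp % 256 ≠ 0 := by omega
  u_walk hcode [hμ.vendor] span [Vorbis.L.textLo, Vorbis.L.textHi] side (v_side)
  · -- 0x104347 (C 1104): the check of the load of `c->sparse`, inside `*c`
    have hun : ShadowUntouched u.mem s_104347.mem := by v_untouched
    refine check_site hsh.inv hun (hbook.sub (b := (u.reg .rdi).toNat + 27) (by omega) (by omega) (by decide)) ?_
    u_omega
  · -- 0x104385 (C 1107): the check of the load of `c->codewords`, inside `*c`
    have hun : ShadowUntouched u.mem s_104385.mem := by v_untouched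
    refine check_site hsh.inv hun (hbook.sub (b := (u.reg .rdi).toNat + 40) (by omega) (by omega) (by decide)) ?_
    u_omega
  · -- 0x10439f (C 1107): the check of the store to `codewords[count]`: the precondition's site
    have hun : ShadowUntouched u.mem s_10439f.mem := by v_untouched
    refine check_site hsh.inv hun hcwc ?_
    clear hap_b1 hap_b2 hap_b3 hap_12 hap_13 hap_23 hw2 hw3
    u_omega
  · -- 0x1043ab (C 1108): the check of the load of `c->codeword_lengths`, inside `*c`
    have hun : ShadowUntouched u.mem s_1043ab.mem := by v_untouched
    refine check_site hsh.inv hun (hbook.sub (b := (u.reg .rdi).toNat + 8) (by omega) (by omega) (by decide)) ?_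
    u_omega
  · -- 0x1043b7 (C 1108): the check of the store to `codeword_lengths[count]`: the precondition's site
    have hun : ShadowUntouched u.mem s_1043b7.mem := by v_untouched
    refine check_site hsh.inv hun hlenc ?_
    clear hap_b1 hap_b2 hap_b3 hap_12 hap_13 hap_23 hw1 hw3
    u_omega
  · -- 0x1043d3 (C 1109): the check of the store to `values[count]`: the precondition's site
    have hun : ShadowUntouched u.mem s_1043d3.mem := by v_untouched
    refine check_site hsh.inv hun hvalc ?_
    clear hap_b1 hap_b2 hap_b3 hap_12 hap_13 hap_23 hw1 hw2
    u_omega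
  · -- 0x104380 (C 1111): the state after the `ret`
    -- the byte stored to `codeword_lengths[count]`: the low byte of `len`, read back from the slot `[rsp + 4]`
    rw [readLE1_writeLE4, byte_roundtrip, Asan.part32_toNat (u.reg .r8), Asan.part32_toNat (u.reg .rsi),
      Asan.part32_toNat (u.reg .rdx)] at w_mem
    -- the three element addresses as the walker builds them, as numbers
    have hadr1 : (Word.ofBV (BitVec.signExtend 64 (Word.part .w32 (u.reg .rcx))) * 4 + UInt64.ofNat cw).toNat
        = cw + 4 * cnt := by
      clear hap_b1 hap_b2 hap_b3 hap_12 hap_13 hap_23 hw2 hw3 w_mem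
      u_omega
    have hadr2 : (Word.ofBV (BitVec.signExtend 64 (Word.part .w32 (u.reg .rcx))) + UInt64.ofNat cl).toNat
        = cl + cnt := by
      clear hap_b1 hap_b2 hap_b3 hap_12 hap_13 hap_23 hw1 hw3 w_mem
      u_omega
    have hadr3 : (u.reg .r9 + Word.ofBV (BitVec.signExtend 64 (Word.part .w32 (u.reg .rcx))) * 4).toNat
        = (u.reg .r9).toNat + 4 * cnt := by
      clear hap_b1 hap_b2 hap_b3 hap_12 hap_13 hap_23 hw1 hw2 w_mem
      u_omega
    refine ReachVia.done ?_
    v_returned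
    · -- the post
      refine ⟨by v_untouched, ?_, ?_⟩
      · intro h0
        rw [hspd] at h0
        exact absurd h0 hs
      · intro _
        simp only [add_entry.cwCell, add_entry.lenCell, add_entry.valCell, argU32, hcw, hcl, hcn]
        unfold Mem.u32 Mem.u8
        rw [← eq_addr _ _ hadr1, ← eq_addr _ _ hadr2, ← eq_addr _ _ hadr3]
        refine ⟨?_, ?_, ?_⟩
        · -- `codewords[count] = huff_code`: the two later stores go to the other cells
          rw [w_mem]
          u_read
        · -- `codeword_lengths[count] = (uint8) len`: the last store goes to `values[count]`
          rw [w_mem]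
          u_read
        · -- `values[count] = symbol`: the last store
          rw [w_mem]
          u_read
    · -- the footprint: the frame and the three cells
      simp only [X86.User.Spec.footprint, add_entry.spec_frame]
      rw [hwr]
      simp only [Block.span]
      u_same

end Vorbis.Spec.add_entry

/-- `add_entry(c, huff_code, symbol, count, len, values)` satisfies its contract: the test of `c->sparse` (one check call) and
then one of two straight-line arms, each proved as a lemma of its own (`dense_arm`, `sparse_arm`). -/
theorem Vorbis.Spec.Worked.add_entry_ok : Vorbis.Spec.add_entry.Statement := by
  intro Lay hLay μ hμ u₀ hcode hload1 hload8 hstore4 hstore1 others frames u ret he hpre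
  by_cases hs : Codebook.sparse u.mem (u.reg .rdi).toNat = 0
  · exact Vorbis.Spec.add_entry.dense_arm hLay hμ hcode hload1 hload8 hstore4 others frames he hpre hs
  · exact Vorbis.Spec.add_entry.sparse_arm hLay hμ hcode hload1 hload8 hstore4 hstore1 others frames he hpre hs
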